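-- pv_equiv track=rewrite | github.com/asalkhaef/Shamir-s_secret_AsalKhaef | create_shares.py | create_shares
-- ===== SOURCE A (Python) =====
-- def create_shares(secret, num_shares, threshold, mod, coefficients):
--     shares = []
--     # Generate each share by evaluating the polynomial at different x values
--     for x in range(1, num_shares + 1):
--         y = secret
--         for power in range(1, threshold):
--             y += coefficients[power - 1] * x ** power
--         shares.append((x, y % mod))
--     return shares
-- ===== SOURCE B (Python) =====
-- def create_shares(secret, num_shares, threshold, mod, coefficients):
--     prefix = coefficients[:max(threshold - 1, 0)]
--
--     def evalp(cs, x):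
--         # Horner, lowest-degree coefficient first: cs[0] + x*(cs[1] + x*(...))
--         if not cs:
--             return 0
--         return cs[0] + x * evalp(cs[1:], x)
--
--     return [(x, (secret + x * evalp(prefix, x)) % mod)
--             for x in range(1, num_shares + 1)]
-- ===== Notes on version B (the rewrite author's own statement) =====
-- stated objective: alternative
-- what changed: Shares are built by mapping a comprehension over the x range instead of appending inside a loop, and each polynomial value is computed by a recursive Horner evaluation over the coefficient prefix instead of summing independent coeff*x**power terms with re-exponentiation.
import Mathlib
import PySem

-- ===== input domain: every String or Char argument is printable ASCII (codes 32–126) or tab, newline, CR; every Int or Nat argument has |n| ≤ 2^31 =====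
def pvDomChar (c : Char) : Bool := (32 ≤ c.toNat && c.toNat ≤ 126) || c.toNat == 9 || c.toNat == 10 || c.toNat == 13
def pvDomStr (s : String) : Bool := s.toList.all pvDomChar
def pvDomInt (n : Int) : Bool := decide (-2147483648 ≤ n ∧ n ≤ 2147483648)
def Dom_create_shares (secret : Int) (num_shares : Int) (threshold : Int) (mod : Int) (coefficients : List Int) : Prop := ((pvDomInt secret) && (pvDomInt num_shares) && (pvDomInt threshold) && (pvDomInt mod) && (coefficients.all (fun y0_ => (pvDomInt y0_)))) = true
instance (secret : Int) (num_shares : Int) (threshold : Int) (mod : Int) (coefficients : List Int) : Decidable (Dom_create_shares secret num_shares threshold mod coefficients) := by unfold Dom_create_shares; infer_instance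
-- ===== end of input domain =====

-- B maps a comprehension over the x range and evaluates each polynomial by a recursive
-- Horner scheme over the coefficient prefix, instead of A's append-loop with per-term
-- re-exponentiation; objective: alternative algorithm of similar cost.

-- ===== PORT A =====
def create_shares (secret : Int) (num_shares : Int) (threshold : Int) (mod : Int) (coefficients : List Int) : List (Int × Int) :=
  (PySem.List.pyRange 1 (num_shares + 1) 1).foldl
    (fun shares x =>
      let y := (PySem.List.pyRange 1 threshold 1).foldl
        (fun y power => y + PySem.List.pyGetD coefficients (power - 1) 0 * x ^ power.toNat) secret
      shares ++ [(x, PySem.Int.mod y mod)]) []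

-- ===== PORT B =====
-- evalp: Horner with lowest-degree coefficient first (recursion on the list)
def evalp : List Int → Int → Int
  | [], _ => 0
  | c :: cs, x => c + x * evalp cs x

def create_shares_alt (secret : Int) (num_shares : Int) (threshold : Int) (mod : Int) (coefficients : List Int) : List (Int × Int) :=
  let prefix_ := PySem.List.slice coefficients none (some (max (threshold - 1) 0))
  (PySem.List.pyRange 1 (num_shares + 1) 1).map
    (fun x => (x, PySem.Int.mod (secret + x * evalp prefix_ x) mod))

-- ===== PRECONDITION & SPEC =====
-- Pre_ excludes exactly the inputs where Python A raises: with at least one share to make,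
-- mod = 0 (ZeroDivisionError) or threshold > len(coefficients)+1 (IndexError).
def Pre_create_shares (secret : Int) (num_shares : Int) (threshold : Int) (mod : Int) (coefficients : List Int) : Prop :=
  num_shares ≤ 0 ∨ (mod ≠ 0 ∧ threshold ≤ (coefficients.length : Int) + 1)
instance (secret : Int) (num_shares : Int) (threshold : Int) (mod : Int) (coefficients : List Int) : Decidable (Pre_create_shares secret num_shares threshold mod coefficients) := by unfold Pre_create_shares; infer_instance
def pvWitness_create_shares : Int × Int × Int × Int × List Int := (5, 3, 2, 7, [3])

def Spec_create_shares (secret : Int) (num_shares : Int) (threshold : Int) (mod : Int) (coefficients : List Int) (out : List (Int × Int)) : Prop := out = create_shares_alt secret num_shares threshold mod coefficients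
instance (secret : Int) (num_shares : Int) (threshold : Int) (mod : Int) (coefficients : List Int) (out : List (Int × Int)) : Decidable (Spec_create_shares secret num_shares threshold mod coefficients out) := by unfold Spec_create_shares; infer_instance

-- ===== CLAIM (what is proved, stated in full; the proofs are below) =====
def Claim_equal_create_shares : Prop := ∀ (secret : Int) (num_shares : Int) (threshold : Int) (mod : Int) (coefficients : List Int), Dom_create_shares secret num_shares threshold mod coefficients → Pre_create_shares secret num_shares threshold mod coefficients → Spec_create_shares secret num_shares threshold mod coefficients (create_shares secret num_shares threshold mod coefficients)

-- ===== LEMMAS AND PROOFS =====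

theorem evalp_take (x : Int) : ∀ (n : Nat) (cs : List Int), n < cs.length →
    evalp (cs.take (n + 1)) x = evalp (cs.take n) x + cs.getD n 0 * x ^ n := by
  intro n
  induction n with
  | zero =>
    intro cs h
    cases cs with
    | nil => simp at h
    | cons c r => simp [evalp]
  | succ n ih =>
    intro cs h
    cases cs with
    | nil => simp at h
    | cons c r =>
      simp only [List.take_succ_cons, evalp, List.getD_cons_succ, List.length_cons] at *
      rw [ih r (by omega)]
      ring

theorem afold_eq (x secret : Int) : ∀ (n : Nat) (cs : List Int), n ≤ cs.length →
    (PySem.List.pyRange 1 ((n : Int) + 1) 1).foldl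
      (fun y power => y + PySem.List.pyGetD cs (power - 1) 0 * x ^ power.toNat) secret
      = secret + x * evalp (cs.take n) x := by
  intro n
  induction n with
  | zero => simp [PySem.List.pyRange_one_eq_nil, evalp]
  | succ n ih =>
    intro cs h
    rw [show ((n + 1 : Nat) : Int) + 1 = ((n : Nat) : Int) + 1 + 1 by push_cast; ring,
      PySem.List.pyRange_one_succ_right (by omega), List.foldl_append]
    simp only [List.foldl_cons, List.foldl_nil]
    rw [ih cs (by omega)]
    have h1 : ((n : Nat) : Int) + 1 - 1 = ((n : Nat) : Int) := by ring
    rw [h1, PySem.List.pyGetD_natCast]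
    have h2 : (((n : Nat) : Int) + 1).toNat = n + 1 := by omega
    rw [h2, evalp_take x n cs (by omega)]
    ring

theorem inner_eq (x secret threshold : Int) (cs : List Int)
    (h : threshold ≤ (cs.length : Int) + 1) :
    (PySem.List.pyRange 1 threshold 1).foldl
      (fun y power => y + PySem.List.pyGetD cs (power - 1) 0 * x ^ power.toNat) secret
      = secret + x * evalp (PySem.List.slice cs none (some (max (threshold - 1) 0))) x := by
  by_cases ht : threshold ≤ 1
  · rw [PySem.List.pyRange_one_eq_nil ht, List.foldl_nil,
      show max (threshold - 1) 0 = 0 by omega, PySem.List.slice_to cs (by omega)]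
    simp [evalp]
  · have hm : max (threshold - 1) 0 = threshold - 1 := by omega
    rw [hm, PySem.List.slice_to cs (by omega)]
    have hn : threshold = ((threshold - 1).toNat : Int) + 1 := by omega
    rw [hn, afold_eq x secret (threshold - 1).toNat cs (by omega)]
    simp

theorem foldl_append_map {α β : Type} (f : α → β) :
    ∀ (l : List α) (acc : List β),
      l.foldl (fun s x => s ++ [f x]) acc = acc ++ l.map f := by
  intro l
  induction l with
  | nil => simp
  | cons a t ih => intro acc; simp [ih]

-- ===== VERDICT (by name: the statement is the Claim_ definition above) =====
theorem create_shares_spec : Claim_equal_create_shares := by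
  intro secret num_shares threshold mod coefficients _ hpre
  unfold Spec_create_shares create_shares create_shares_alt
  rcases hpre with h | ⟨_, hlen⟩
  · rw [PySem.List.pyRange_one_eq_nil (a := 1) (b := num_shares + 1) (by omega)]
    simp
  · rw [foldl_append_map]
    simp only [List.nil_append]
    congr 1
    funext x
    rw [inner_eq x secret threshold coefficients hlen]
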